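-- pv_equiv track=rewrite | github.com/clarinsi/gigafida_segmentacija | segment_gigafida/parse_gigafida.py | split_on_short_paragraphs
-- ===== SOURCE A (Python) =====
-- def get_words_in_paragraph(paragraph):
--     total_words = 0
--     for sent in paragraph:
--         total_words += len(sent)
--     return total_words
--
-- def split_on_short_paragraphs(text):
--     split_text = []
--     curr_paragraphs = []
--     for paragraph in text:
--         paragraph_len = get_words_in_paragraph(paragraph)
--         if paragraph_len < 10:
--             split_text.append(curr_paragraphs)
--             split_text.append([paragraph])
--             curr_paragraphs = []
--         else:
--             curr_paragraphs.append(paragraph)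
--     return split_text
-- ===== SOURCE B (Python) =====
-- def split_on_short_paragraphs(text):
--     # Collect (index, paragraph) of every short paragraph, then slice the
--     # original list between consecutive short indices.
--     shorts = [(i, p) for i, p in enumerate(text)
--               if sum(len(sent) for sent in p) < 10]
--     result = []
--     prev = 0
--     for i, p in shorts:
--         result.append(list(text[prev:i]))
--         result.append([p])
--         prev = i + 1
--     return result
-- ===== Notes on version B (the rewrite author's own statement) =====
-- stated objective: alternative
-- what changed: Instead of a single pass carrying a mutable current-group accumulator, B first collects the indices of short paragraphs and then builds the output by slicing the input list between consecutive short indices with a moving cursor.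
import Mathlib
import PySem

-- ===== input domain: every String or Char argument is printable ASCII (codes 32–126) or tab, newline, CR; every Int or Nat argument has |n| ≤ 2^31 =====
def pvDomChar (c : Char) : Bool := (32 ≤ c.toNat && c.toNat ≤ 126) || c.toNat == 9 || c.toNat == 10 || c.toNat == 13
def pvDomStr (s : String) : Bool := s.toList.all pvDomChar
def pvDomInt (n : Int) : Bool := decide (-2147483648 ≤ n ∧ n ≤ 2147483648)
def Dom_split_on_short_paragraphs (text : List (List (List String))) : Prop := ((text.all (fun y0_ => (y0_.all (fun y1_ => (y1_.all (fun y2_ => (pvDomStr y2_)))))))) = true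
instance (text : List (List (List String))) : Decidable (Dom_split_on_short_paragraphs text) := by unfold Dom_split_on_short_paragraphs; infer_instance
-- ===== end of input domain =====

-- B builds the output by slicing the input between precomputed short-paragraph
-- indices instead of A's single pass with a current-group accumulator (objective: alternative).

-- ===== PORT A =====
-- port of get_words_in_paragraph
def get_words_in_paragraph (paragraph : List (List String)) : Int :=
  paragraph.foldl (fun total_words sent => total_words + (sent.length : Int)) 0

def split_on_short_paragraphs (text : List (List (List String))) : List (List (List (List String))) :=
  (text.foldl
    (fun (st : List (List (List (List String))) × List (List (List String))) paragraph =>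
      let paragraph_len := get_words_in_paragraph paragraph
      if paragraph_len < 10 then
        (st.1 ++ [st.2] ++ [[paragraph]], [])
      else
        (st.1, st.2 ++ [paragraph]))
    ([], [])).1

-- ===== PORT B =====
-- shorts = [(i, p) for i, p in enumerate(text) if sum(len(sent) for sent in p) < 10]
def pvShortsB (text : List (List (List String))) : List (Int × List (List String)) :=
  (PySem.List.enumerate text 0).filter
    (fun ip => (ip.2.map (fun sent => (sent.length : Int))).sum < 10)

def split_on_short_paragraphs_alt (text : List (List (List String))) : List (List (List (List String))) :=
  ((pvShortsB text).foldl
    (fun (st : List (List (List (List String))) × Int) ip =>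
      (st.1 ++ [PySem.List.slice text (some st.2) (some ip.1)] ++ [[ip.2]], ip.1 + 1))
    ([], 0)).1

-- ===== PRECONDITION & SPEC =====
def Spec_split_on_short_paragraphs (text : List (List (List String))) (out : List (List (List (List String)))) : Prop := out = split_on_short_paragraphs_alt text
instance (text : List (List (List String))) (out : List (List (List (List String)))) : Decidable (Spec_split_on_short_paragraphs text out) := by unfold Spec_split_on_short_paragraphs; infer_instance

-- ===== CLAIM (what is proved, stated in full; the proofs are below) =====
def Claim_equal_split_on_short_paragraphs : Prop := ∀ (text : List (List (List String))), Dom_split_on_short_paragraphs text → Spec_split_on_short_paragraphs text (split_on_short_paragraphs text)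

-- ===== LEMMAS AND PROOFS =====

-- canonical recursion both ports are reduced to
def pvLoop : List (List (List String)) → List (List (List String)) → List (List (List (List String)))
  | [], _ => []
  | p :: rest, curr =>
      if get_words_in_paragraph p < 10 then curr :: [p] :: pvLoop rest []
      else pvLoop rest (curr ++ [p])

lemma pvWc_eq (p : List (List String)) :
    (p.map (fun sent => (sent.length : Int))).sum = get_words_in_paragraph p := by
  unfold get_words_in_paragraph
  rw [PySem.List.foldl_add]
  simp

lemma pvA_loop (text : List (List (List String)))
    (acc : List (List (List (List String)))) (curr : List (List (List String))) :
    (text.foldl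
      (fun (st : List (List (List (List String))) × List (List (List String))) paragraph =>
        let paragraph_len := get_words_in_paragraph paragraph
        if paragraph_len < 10 then
          (st.1 ++ [st.2] ++ [[paragraph]], [])
        else
          (st.1, st.2 ++ [paragraph]))
      (acc, curr)).1 = acc ++ pvLoop text curr := by
  induction text generalizing acc curr with
  | nil => simp [pvLoop]
  | cons p rest ih =>
      simp only [List.foldl_cons, pvLoop]
      by_cases h : get_words_in_paragraph p < 10
      · simp only [h, ih]
        simp
      · simp only [if_neg h, ih]

lemma pvB_loop (R pre mid : List (List (List String)))
    (res : List (List (List (List String)))) :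
    (((PySem.List.enumerate R ((pre.length : Int) + (mid.length : Int))).filter
        (fun ip => (ip.2.map (fun sent => (sent.length : Int))).sum < 10)).foldl
      (fun (st : List (List (List (List String))) × Int) ip =>
        (st.1 ++ [PySem.List.slice (pre ++ mid ++ R) (some st.2) (some ip.1)] ++ [[ip.2]], ip.1 + 1))
      (res, (pre.length : Int))).1 = res ++ pvLoop R mid := by
  induction R generalizing pre mid res with
  | nil => simp [PySem.List.enumerate, pvLoop]
  | cons q R' ih =>
      rw [PySem.List.enumerate_cons]
      by_cases h : get_words_in_paragraph q < 10
      · have hq : ((q.map (fun sent => (sent.length : Int))).sum < 10) := by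
          rw [pvWc_eq]; exact h
        rw [List.filter_cons_of_pos (by simpa using hq), List.foldl_cons]
        have hslice : PySem.List.slice (pre ++ mid ++ q :: R')
            (some (pre.length : Int)) (some ((pre.length : Int) + (mid.length : Int))) = mid := by
          have := PySem.List.slice_natCast_add (pre ++ mid ++ q :: R') pre.length mid.length
          rw [this]
          simp
        rw [hslice]
        have harr : (pre.length : Int) + (mid.length : Int) + 1
            = (((pre ++ mid ++ [q]).length : Int)) := by
          push_cast [List.length_append, List.length_singleton]; ring
        rw [harr, show pre ++ mid ++ q :: R' = pre ++ mid ++ [q] ++ R' by simp]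
        have key := ih (pre ++ mid ++ [q]) [] (res ++ [mid] ++ [[q]])
        simp only [List.append_nil, List.length_nil, Nat.cast_zero, add_zero] at key
        rw [key]
        simp [pvLoop, h]
      · have hq : ¬ ((q.map (fun sent => (sent.length : Int))).sum < 10) := by
          rw [pvWc_eq]; exact h
        rw [List.filter_cons_of_neg (by simpa using hq)]
        have harr : (pre.length : Int) + (mid.length : Int) + 1
            = ((pre.length : Int) + (((mid ++ [q]).length : Int))) := by
          push_cast [List.length_append, List.length_singleton]; ring
        rw [harr, show pre ++ mid ++ q :: R' = pre ++ (mid ++ [q]) ++ R' by simp]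
        rw [ih pre (mid ++ [q]) res]
        simp [pvLoop, h]

-- ===== VERDICT (by name: the statement is the Claim_ definition above) =====
theorem split_on_short_paragraphs_spec : Claim_equal_split_on_short_paragraphs := by
  intro text _
  unfold Spec_split_on_short_paragraphs split_on_short_paragraphs split_on_short_paragraphs_alt pvShortsB
  rw [pvA_loop text [] []]
  have := pvB_loop text [] [] []
  simpa using this.symm
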